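-- pv_equiv track=rewrite | github.com/0pankajkumar/small-codes | competitiveProgramming/codechef/many_random_files/compiler.py | problemSolver1
-- ===== SOURCE A (Python) =====
-- def problemSolver1(stree):
-- 	count = 0
-- 	ans = 0
-- 	for i in range(len(stree)):
-- 		if stree[i] == '<':
-- 			count += 1
-- 		elif stree[i] == '>':
-- 			if count <= 0:
-- 				break
-- 			count -= 1
-- 		if count == 0:
-- 			ans = (i+1)
--
-- 	return ans
-- ===== SOURCE B (Python) =====
-- def problemSolver1(stree):
--     # running-balance table: +1 for '<', -1 for '>', 0 otherwise
--     bal = []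
--     s = 0
--     for c in stree:
--         s += 1 if c == '<' else (-1 if c == '>' else 0)
--         bal.append(s)
--     # break point: first index whose prefix balance goes negative (unmatched '>')
--     brk = next((i for i, b in enumerate(bal) if b < 0), len(bal))
--     # last index before the break point where the balance returns to 0
--     for j in range(brk - 1, -1, -1):
--         if bal[j] == 0:
--             return j + 1
--     return 0
-- ===== Notes on version B (the rewrite author's own statement) =====
-- stated objective: alternative
-- what changed: Replaces A's single stateful loop with break by a two-phase table method: build a prefix-balance table, locate the first negative balance (the break point), then scan backwards for the last zero balance before it.
import Mathlib
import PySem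

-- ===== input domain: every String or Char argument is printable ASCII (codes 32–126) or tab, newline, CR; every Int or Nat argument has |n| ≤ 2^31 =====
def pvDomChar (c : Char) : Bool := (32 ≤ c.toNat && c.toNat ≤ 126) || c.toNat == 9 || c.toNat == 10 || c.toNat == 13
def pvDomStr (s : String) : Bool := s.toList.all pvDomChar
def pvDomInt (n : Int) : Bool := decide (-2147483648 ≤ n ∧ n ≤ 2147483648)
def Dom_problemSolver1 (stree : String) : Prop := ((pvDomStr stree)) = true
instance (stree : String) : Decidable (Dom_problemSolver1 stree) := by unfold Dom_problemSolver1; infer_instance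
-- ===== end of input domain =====

-- B replaces A's single break-on-unmatched loop by a prefix-balance table scanned in two
-- phases (first negative balance, then last zero before it); same O(n) cost, alternative structure.

-- ===== PORT A =====
-- the for-loop of A: state (count, ans), i is the current index; 'break' returns ans
def pvLoopA : List Char → Int → Int → Int → Int
  | [], _, ans, _ => ans
  | c :: cs, count, ans, i =>
    if c = '<' then
      pvLoopA cs (count + 1) (if count + 1 = 0 then i + 1 else ans) (i + 1)
    else if c = '>' then
      if count ≤ 0 then ans
      else pvLoopA cs (count - 1) (if count - 1 = 0 then i + 1 else ans) (i + 1)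
    else
      pvLoopA cs count (if count = 0 then i + 1 else ans) (i + 1)

def problemSolver1 (stree : String) : Int :=
  pvLoopA stree.toList 0 0 0

-- ===== PORT B =====
-- per-character balance delta
def pvDelta (c : Char) : Int := if c = '<' then 1 else if c = '>' then -1 else 0

-- running-balance table (the append loop of Source B)
def pvAccum : List Int → Int → List Int
  | [], _ => []
  | d :: ds, s => (s + d) :: pvAccum ds (s + d)

-- index of the first negative balance, len(bal) if none (Source B's next(..., len(bal)))
def pvFirstNeg : List Int → Nat
  | [] => 0
  | b :: bs => if b < 0 then 0 else pvFirstNeg bs + 1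

-- backwards scan: for j in range(brk-1,-1,-1): if bal[j]==0: return j+1; return 0
-- (bal[j] is always in range since j < brk ≤ len bal, so getD is exact here)
def pvLastZero (bal : List Int) : Nat → Int
  | 0 => 0
  | j + 1 => if bal.getD j 0 = 0 then ((j : Int) + 1) else pvLastZero bal j

def problemSolver1_alt (stree : String) : Int :=
  let bal := pvAccum (stree.toList.map pvDelta) 0
  pvLastZero bal (pvFirstNeg bal)

-- ===== PRECONDITION & SPEC =====
def Spec_problemSolver1 (stree : String) (out : Int) : Prop := out = problemSolver1_alt stree
instance (stree : String) (out : Int) : Decidable (Spec_problemSolver1 stree out) := by unfold Spec_problemSolver1; infer_instance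

-- ===== CLAIM (what is proved, stated in full; the proofs are below) =====
def Claim_equal_problemSolver1 : Prop := ∀ (stree : String), Dom_problemSolver1 stree → Spec_problemSolver1 stree (problemSolver1 stree)

-- ===== LEMMAS AND PROOFS =====

-- forward scan over the balance table, mirroring A's loop shape
def pvFwd : List Int → Int → Int → Int
  | [], ans, _ => ans
  | b :: bs, ans, i => if b < 0 then ans else pvFwd bs (if b = 0 then i + 1 else ans) (i + 1)

-- last (index+1) of a zero balance before the first negative one, 0 if none
def pvLz : List Int → Nat
  | [] => 0
  | b :: bs => if b < 0 then 0 else if pvLz bs ≠ 0 then pvLz bs + 1 else if b = 0 then 1 else 0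

theorem pvLoopA_eq_fwd (cs : List Char) (c ans i : Int) (hc : 0 ≤ c) :
    pvLoopA cs c ans i = pvFwd (pvAccum (cs.map pvDelta) c) ans i := by
  induction cs generalizing c ans i with
  | nil => rfl
  | cons ch cs ih =>
    by_cases h1 : ch = '<'
    · subst h1
      have e1 : pvLoopA ('<' :: cs) c ans i
          = pvLoopA cs (c + 1) (if c + 1 = 0 then i + 1 else ans) (i + 1) := rfl
      have e2 : pvFwd (pvAccum (('<' :: cs).map pvDelta) c) ans i
          = if c + 1 < 0 then ans
            else pvFwd (pvAccum (cs.map pvDelta) (c + 1))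
              (if c + 1 = 0 then i + 1 else ans) (i + 1) := rfl
      rw [e1, e2, if_neg (show ¬ c + 1 < 0 by omega), if_neg (show ¬ c + 1 = 0 by omega)]
      exact ih _ _ _ (by omega)
    · by_cases h2 : ch = '>'
      · subst h2
        have e1 : pvLoopA ('>' :: cs) c ans i
            = if c ≤ 0 then ans
              else pvLoopA cs (c - 1) (if c - 1 = 0 then i + 1 else ans) (i + 1) := rfl
        have e2 : pvFwd (pvAccum (('>' :: cs).map pvDelta) c) ans i
            = if c + -1 < 0 then ans
              else pvFwd (pvAccum (cs.map pvDelta) (c + -1))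
                (if c + -1 = 0 then i + 1 else ans) (i + 1) := rfl
        by_cases h3 : c ≤ 0
        · rw [e1, e2, if_pos h3, if_pos (show c + -1 < 0 by omega)]
        · rw [e1, e2, if_neg h3, if_neg (show ¬ c + -1 < 0 by omega),
            show c - 1 = c + -1 from sub_eq_add_neg c 1]
          exact ih _ _ _ (by omega)
      · have e0 : pvDelta ch = 0 := by simp [pvDelta, h1, h2]
        have e1 : pvLoopA (ch :: cs) c ans i
            = if ch = '<' then
                pvLoopA cs (c + 1) (if c + 1 = 0 then i + 1 else ans) (i + 1)
              else if ch = '>' then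
                if c ≤ 0 then ans
                else pvLoopA cs (c - 1) (if c - 1 = 0 then i + 1 else ans) (i + 1)
              else pvLoopA cs c (if c = 0 then i + 1 else ans) (i + 1) := rfl
        have e2 : pvFwd (pvAccum ((ch :: cs).map pvDelta) c) ans i
            = if c + pvDelta ch < 0 then ans
              else pvFwd (pvAccum (cs.map pvDelta) (c + pvDelta ch))
                (if c + pvDelta ch = 0 then i + 1 else ans) (i + 1) := rfl
        rw [e1, e2, if_neg h1, if_neg h2, e0, add_zero,
          if_neg (show ¬ c < 0 by omega)]
        exact ih _ _ _ hc

theorem pvFwd_eq_lz (bal : List Int) (ans i : Int) :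
    pvFwd bal ans i = if pvLz bal = 0 then ans else i + (pvLz bal : Int) := by
  induction bal generalizing ans i with
  | nil => rfl
  | cons b bs ih =>
    simp only [pvFwd, pvLz]
    by_cases h1 : b < 0
    · simp [h1]
    · rw [if_neg h1, ih]
      by_cases h2 : pvLz bs = 0
      · by_cases h3 : b = 0 <;> simp [h1, h2, h3]
      · simp only [h1, if_false, h2, Ne, not_false_iff, if_true]
        rw [if_neg (by omega : ¬ pvLz bs + 1 = 0)]
        push_cast; ring

theorem pvLastZero_succ (bal : List Int) (j : Nat) :
    pvLastZero bal (j + 1) = if bal.getD j 0 = 0 then ((j : Int) + 1) else pvLastZero bal j := rfl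

theorem pvLastZero_cons (b : Int) (bs : List Int) (j : Nat) :
    pvLastZero (b :: bs) (j + 1) =
      if pvLastZero bs j ≠ 0 then pvLastZero bs j + 1 else if b = 0 then 1 else 0 := by
  induction j with
  | zero => simp [pvLastZero]
  | succ j ih =>
    rw [pvLastZero_succ (b :: bs) (j + 1), pvLastZero_succ bs j]
    simp only [List.getD_cons_succ]
    by_cases h : bs.getD j 0 = 0
    · rw [if_pos h, if_pos h, if_pos (by omega : ((j : Int) + 1) ≠ 0)]
      push_cast
      ring
    · rw [if_neg h, if_neg h, ih]

theorem pvLastZero_eq_lz (bal : List Int) :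
    pvLastZero bal (pvFirstNeg bal) = (pvLz bal : Int) := by
  induction bal with
  | nil => rfl
  | cons b bs ih =>
    simp only [pvFirstNeg, pvLz]
    by_cases h1 : b < 0
    · simp [h1, pvLastZero]
    · rw [if_neg h1, if_neg h1, pvLastZero_cons, ih]
      by_cases h2 : pvLz bs = 0
      · by_cases h3 : b = 0 <;> simp [h2, h3]
      · rw [if_pos (by exact_mod_cast h2 : (pvLz bs : Int) ≠ 0), if_pos h2]
        push_cast; ring

-- ===== VERDICT (by name: the statement is the Claim_ definition above) =====
theorem problemSolver1_spec : Claim_equal_problemSolver1 := by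
  intro stree _
  unfold Spec_problemSolver1 problemSolver1 problemSolver1_alt
  rw [pvLoopA_eq_fwd _ _ _ _ le_rfl, pvFwd_eq_lz, pvLastZero_eq_lz]
  by_cases h : pvLz (pvAccum (stree.toList.map pvDelta) 0) = 0 <;> simp [h]
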